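-- pv_equiv track=rewrite | github.com/alb-i/16scale-on-15ma | tabs.py | combineFrettings
-- ===== SOURCE A (Python) =====
-- unplayedString = "" # we use this to indicate that there is a string which is left alone :)
--
-- def combineFrettings(frettings):
--     current = []
--     for f in frettings:
--         if len(current) < len(f):
--             current += [unplayedString] * (len(f)-len(current))
--         for i,x in enumerate(f):
--             if x == unplayedString:
--                 continue
--             current[i] = x
--     return current
-- ===== SOURCE B (Python) =====
-- unplayedString = ""
--
-- def combineFrettings(frettings):
--     n = max((len(f) for f in frettings), default=0)
--     result = [unplayedString] * n
--     for i in range(n):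
--         for f in reversed(frettings):
--             if i < len(f) and f[i] != unplayedString:
--                 result[i] = f[i]
--                 break
--     return result
-- ===== Notes on version B (the rewrite author's own statement) =====
-- stated objective: alternative
-- what changed: Replaces the row-by-row last-writer-wins overlay accumulation with a column-major pass: for each position, a reverse scan of the frettings finds the last non-empty value and breaks early.
import Mathlib
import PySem

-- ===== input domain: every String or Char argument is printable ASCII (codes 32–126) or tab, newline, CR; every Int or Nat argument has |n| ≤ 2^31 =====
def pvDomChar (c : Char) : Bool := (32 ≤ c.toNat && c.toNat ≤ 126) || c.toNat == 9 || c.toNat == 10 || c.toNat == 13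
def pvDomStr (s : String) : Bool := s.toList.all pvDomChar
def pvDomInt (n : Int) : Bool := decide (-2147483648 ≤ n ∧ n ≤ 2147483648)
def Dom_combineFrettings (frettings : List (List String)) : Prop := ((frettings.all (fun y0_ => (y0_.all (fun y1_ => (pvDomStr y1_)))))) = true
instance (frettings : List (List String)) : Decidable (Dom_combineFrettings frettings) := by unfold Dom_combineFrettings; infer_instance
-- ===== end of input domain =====

-- B replaces A's row-by-row last-writer-wins overlay with a column-major reverse search per position (alternative decomposition, same exact result).

-- ===== PORT A =====
-- inner loop `for i,x in enumerate(f): if x == "": continue; current[i] = x`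
def pvOverlayAux (cu : List String) (f : List String) (i : Nat) : List String :=
  match f with
  | [] => cu
  | x :: rest => pvOverlayAux (if x = "" then cu else cu.set i x) rest (i + 1)

def combineFrettings (frettings : List (List String)) : List String :=
  frettings.foldl
    (fun current f =>
      let current := if current.length < f.length
        then current ++ List.replicate (f.length - current.length) ""
        else current
      pvOverlayAux current f 0)
    []

-- ===== PORT B =====
-- `max((len(f) for f in frettings), default=0)`
def pvMaxLen (frettings : List (List String)) : Nat :=
  frettings.foldl (fun m f => max m f.length) 0

-- the inner `for f in reversed(frettings): … break` scan for one position i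
def pvPick (fs : List (List String)) (i : Nat) : String :=
  match fs with
  | [] => ""
  | f :: rest => if h : i < f.length then
      if f[i] ≠ "" then f[i] else pvPick rest i
    else pvPick rest i

def combineFrettings_alt (frettings : List (List String)) : List String :=
  (List.range (pvMaxLen frettings)).map (fun i => pvPick frettings.reverse i)

-- ===== PRECONDITION & SPEC =====
def Spec_combineFrettings (frettings : List (List String)) (out : List String) : Prop := out = combineFrettings_alt frettings
instance (frettings : List (List String)) (out : List String) : Decidable (Spec_combineFrettings frettings out) := by unfold Spec_combineFrettings; infer_instance

-- ===== CLAIM (what is proved, stated in full; the proofs are below) =====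
def Claim_equal_combineFrettings : Prop := ∀ (frettings : List (List String)), Dom_combineFrettings frettings → Spec_combineFrettings frettings (combineFrettings frettings)

-- ===== LEMMAS AND PROOFS =====

theorem pvOverlayAux_length (f cu : List String) (k : Nat) :
    (pvOverlayAux cu f k).length = cu.length := by
  induction f generalizing cu k with
  | nil => rfl
  | cons x rest ih =>
    simp only [pvOverlayAux]
    rw [ih]
    split <;> simp

theorem pvOverlayAux_getElem? (f : List String) (cu : List String) (k j : Nat)
    (hlen : k + f.length ≤ cu.length) :
    (pvOverlayAux cu f k)[j]? =
      if h : k ≤ j ∧ j - k < f.length ∧ f[j - k]! ≠ "" then some (f[j - k]!) else cu[j]? := by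
  induction f generalizing cu k with
  | nil => simp [pvOverlayAux]
  | cons x rest ih =>
    simp only [pvOverlayAux]
    have hlen' : (k+1) + rest.length ≤ (if x = "" then cu else cu.set k x).length := by
      split <;> simp at hlen ⊢ <;> omega
    rw [ih _ _ hlen']
    by_cases hk : k ≤ j
    · rcases Nat.eq_or_lt_of_le hk with rfl | hk'
      · -- j = k : index 0 of x :: rest
        simp only [Nat.sub_self]
        have hx : (x :: rest)[0]! = x := by simp [List.getElem!_cons_zero]
        by_cases hkk : k + 1 ≤ k
        · omega
        · simp only [hkk, false_and, dite_false]
          by_cases hxe : x = ""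
          · simp [hxe]
          · have hklt : k < cu.length := by simp at hlen; omega
            simp [hx, hxe, hklt]
      · -- j > k
        have h1 : k + 1 ≤ j := hk'
        have h2 : j - k = (j - (k+1)) + 1 := by omega
        have hidx : (x :: rest)[j - k]! = rest[j - (k+1)]! := by
          rw [h2]; simp [List.getElem!_cons_succ]
        by_cases hcu : j - (k+1) < rest.length ∧ rest[j - (k+1)]! ≠ ""
        · obtain ⟨hb, hne⟩ := hcu
          rw [dif_pos ⟨h1, hb, hne⟩,
              dif_pos ⟨hk, by simp [List.length_cons]; omega, by rw [hidx]; exact hne⟩, hidx]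
        · have hnot : ¬ (k ≤ j ∧ j - k < (x :: rest).length ∧ (x :: rest)[j - k]! ≠ "") := by
            rintro ⟨_, hlt, hne⟩
            rw [hidx] at hne
            exact hcu ⟨by simp at hlt; omega, hne⟩
          have hnot' : ¬ (k + 1 ≤ j ∧ j - (k+1) < rest.length ∧ rest[j - (k+1)]! ≠ "") := by
            rintro ⟨_, hlt, hne⟩; exact hcu ⟨hlt, hne⟩
          rw [dif_neg hnot', dif_neg hnot]
          split
          · next hxe => rfl
          · rw [List.getElem?_set_ne (by omega)]
    · have h1 : ¬ (k ≤ j ∧ j - k < (x :: rest).length ∧ (x :: rest)[j - k]! ≠ "") := by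
        rintro ⟨h, _, _⟩; exact hk h
      have h2 : ¬ (k + 1 ≤ j ∧ j - (k+1) < rest.length ∧ rest[j - (k+1)]! ≠ "") := by
        rintro ⟨h, _, _⟩; omega
      rw [dif_neg h2, dif_neg h1]
      split
      · next hxe => rfl
      · rw [List.getElem?_set_ne (by omega)]

theorem pvMaxLen_append (fs : List (List String)) (f : List String) :
    pvMaxLen (fs ++ [f]) = max (pvMaxLen fs) f.length := by
  simp [pvMaxLen, List.foldl_append]

theorem le_pvMaxLen (fs : List (List String)) (f : List String) (hf : f ∈ fs) :
    f.length ≤ pvMaxLen fs := by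
  induction fs using List.reverseRecOn with
  | nil => simp at hf
  | append_singleton gs g ih =>
    rw [pvMaxLen_append]
    rcases List.mem_append.mp hf with h | h
    · exact le_trans (ih h) (le_max_left _ _)
    · simp at h; subst h; exact le_max_right _ _
  
theorem pvPick_big (fs : List (List String)) (i : Nat)
    (h : ∀ f ∈ fs, f.length ≤ i) : pvPick fs i = "" := by
  induction fs with
  | nil => rfl
  | cons f rest ih =>
    have hf := h f (by simp)
    simp only [pvPick]
    rw [dif_neg (by omega)]
    exact ih (fun g hg => h g (by simp [hg]))

theorem combine_char (fs : List (List String)) :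
    (combineFrettings fs).length = pvMaxLen fs ∧
    ∀ j, j < pvMaxLen fs → (combineFrettings fs)[j]? = some (pvPick fs.reverse j) := by
  induction fs using List.reverseRecOn with
  | nil => exact ⟨rfl, by intro j hj; simp [pvMaxLen] at hj⟩
  | append_singleton gs f ih =>
    obtain ⟨ihlen, ihget⟩ := ih
    have hstep : combineFrettings (gs ++ [f]) =
        pvOverlayAux
          (if (combineFrettings gs).length < f.length
            then (combineFrettings gs) ++ List.replicate (f.length - (combineFrettings gs).length) ""
            else combineFrettings gs) f 0 := by
      simp [combineFrettings, List.foldl_append]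
    set cu := combineFrettings gs with hcu
    set cu' := if cu.length < f.length then cu ++ List.replicate (f.length - cu.length) "" else cu with hcu'
    have hclen : cu'.length = max cu.length f.length := by
      rw [hcu']; split <;> simp <;> omega
    have hlenmax : (combineFrettings (gs ++ [f])).length = pvMaxLen (gs ++ [f]) := by
      rw [hstep, pvOverlayAux_length, hclen, ihlen, pvMaxLen_append]
    refine ⟨hlenmax, ?_⟩
    intro j hj
    rw [pvMaxLen_append] at hj
    have hget := pvOverlayAux_getElem? f cu' 0 j (by rw [hclen]; omega)
    rw [hstep, hget]
    have hrev : (gs ++ [f]).reverse = f :: gs.reverse := by simp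
    rw [hrev]
    have hcu'get : cu'[j]? = if j < cu.length then cu[j]? else some "" := by
      rw [hcu']
      split
      · next hlt =>
        by_cases hjcu : j < cu.length
        · simp [hjcu, List.getElem?_append_left]
        · rw [if_neg hjcu, List.getElem?_append_right (by omega)]
          rw [List.getElem?_replicate]
          rw [if_pos (by rw [ihlen] at hjcu ⊢; omega)]
      · next hge =>
        rw [if_pos (by rw [ihlen] at hge ⊢; omega)]
    by_cases hcase : j < f.length ∧ f[j]! ≠ ""
    · obtain ⟨hb, hne2⟩ := hcase
      have hfj : f[j]! = f[j]'hb := by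
        simp [List.getElem!_eq_getElem?_getD, List.getElem?_eq_getElem hb]
      rw [dif_pos ⟨Nat.zero_le j, by simpa using hb, by simpa using hne2⟩]
      simp only [Nat.sub_zero]
      have hpick : pvPick (f :: gs.reverse) j = f[j]'hb := by
        simp only [pvPick]
        rw [dif_pos hb, if_pos (by rw [← hfj]; exact hne2)]
      rw [hpick, hfj]
    · have hne : ¬ (0 ≤ j ∧ j - 0 < f.length ∧ f[j - 0]! ≠ "") := by
        rintro ⟨_, h1, h2⟩
        simp at h1 h2
        exact hcase ⟨h1, by simpa [List.getElem!_eq_getElem?_getD] using h2⟩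
      rw [dif_neg hne, hcu'get]
      have hpick : pvPick (f :: gs.reverse) j = pvPick gs.reverse j := by
        simp only [pvPick]
        split
        · next hlt =>
          rw [if_neg]
          intro h
          exact hcase ⟨hlt, by
            simpa [List.getElem!_eq_getElem?_getD, List.getElem?_eq_getElem hlt] using h⟩
        · rfl
      rw [hpick]
      by_cases hjcu : j < cu.length
      · rw [if_pos hjcu]
        exact (ihget j (by rwa [ihlen] at hjcu)) ▸ rfl
      · rw [if_neg hjcu]
        have : pvPick gs.reverse j = "" := by
          apply pvPick_big
        
          intro g hg
          have := le_pvMaxLen gs g (by simpa using hg)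
          rw [ihlen] at hjcu
          omega
        rw [this]

-- ===== VERDICT (by name: the statement is the Claim_ definition above) =====
theorem combineFrettings_spec : Claim_equal_combineFrettings := by
  intro fs _
  unfold Spec_combineFrettings combineFrettings_alt
  obtain ⟨hlen, hget⟩ := combine_char fs
  apply List.ext_getElem?
  intro j
  by_cases hj : j < pvMaxLen fs
  · rw [hget j hj, List.getElem?_map, List.getElem?_range hj]
    rfl
  · rw [List.getElem?_eq_none (by omega : (combineFrettings fs).length ≤ j)]
    rw [List.getElem?_eq_none (by simp; omega)]
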